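-- pv_equiv track=rewrite | github.com/Rama189/Coffee | code_code/dynamic_programming/0/3.equal_sum_partition.py | findPartion
-- ===== SOURCE A (Python) =====
-- def findPartion(arr, n):
--     sum_value = sum(arr)
--     i, j = 0, 0
--
--     if sum_value % 2 != 0:
--         return False
--
--     rows = len(arr) + 1
--     cols = sum_value + 1
--     dp = [[False for _ in range(cols)] for _ in range(rows)]
--
--     for i in range(rows):
--         dp[i][0] = True
--
--     for i in range(1, rows):
--         for j in range(1, cols):
--             if j >= arr[i - 1]:
--                 dp[i][j] = dp[i - 1][j] or dp[i - 1][j - arr[i - 1]]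
--             else:
--                 dp[i][j] = dp[i - 1][j]
--
--     return dp[rows - 1][cols - 1]
-- ===== SOURCE B (Python) =====
-- def findPartion(arr, n):
--     total = sum(arr)
--     if total % 2 != 0:
--         return False
--     target = total // 2
--     reachable = {0}
--     for num in arr:
--         reachable = reachable | {r + num for r in reachable}
--     return target in reachable
-- ===== Notes on version B (the rewrite author's own statement) =====
-- stated objective: alternative
-- what changed: Replaces the (rows x cols) boolean table indexed by positions with a single set of reachable subset sums grown once per element, and tests the half-sum target in it instead of reading the table's last cell.
-- intended difference: On inputs with even nonzero sum of nonnegative elements that admit no subset summing to half the total (e.g. [2]), A returns True because it reads dp[n][sum] (the full sum is always reachable) instead of dp[n][sum//2], while B returns False, the intended answer to the equal-sum-partition question. — e.g. on findPartion([2], 1): A returns true, B returns false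
-- outside the precondition, e.g. on findPartion([1, 4, -1], 0): A returns True, B returns False; on findPartion([7, 4, 5, 10, 9, 1, -4], 0): A returns True, B returns True; on findPartion([-1, 3], 2): A raises IndexError, B returns False
import Mathlib
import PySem

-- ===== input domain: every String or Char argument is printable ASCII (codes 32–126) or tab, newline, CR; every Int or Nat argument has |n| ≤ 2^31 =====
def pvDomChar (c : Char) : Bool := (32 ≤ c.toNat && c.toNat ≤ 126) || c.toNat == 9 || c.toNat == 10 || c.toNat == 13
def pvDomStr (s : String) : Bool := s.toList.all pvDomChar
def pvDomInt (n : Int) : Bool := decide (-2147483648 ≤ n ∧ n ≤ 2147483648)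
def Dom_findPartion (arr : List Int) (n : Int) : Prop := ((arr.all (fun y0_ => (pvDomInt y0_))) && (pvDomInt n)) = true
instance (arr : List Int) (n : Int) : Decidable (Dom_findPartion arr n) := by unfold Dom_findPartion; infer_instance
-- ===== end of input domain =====

-- B replaces A's (rows × cols) boolean table with a set of reachable subset sums grown once per
-- element and tests the half-sum target in it; on even-sum inputs with no equal partition A
-- returns True (it reads dp[n][sum], always reachable) while B returns the intended False (D_ below).

-- ===== PORT A =====
-- dp is kept as its rows: row 0 is [True] ++ (cols-1) Falses; each later row i is exactly the
-- inner j-loop over the previous row (dp[i][0] = True, then j = 1 .. cols-1 in order).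
-- pyGetD is exact here: under Pre_ every read index is in range (an out-of-range read is where
-- the Python raises IndexError, and such inputs are outside Pre_).
def findPartion (arr : List Int) (n : Int) : Bool :=
  let sum_value := arr.sum
  if PySem.Int.mod sum_value 2 ≠ 0 then false
  else
    let cols := sum_value + 1
    let row0 : List Bool := true :: (PySem.List.pyRange 1 cols 1).map (fun _ => false)
    let final := arr.foldl (fun prev a =>
      true :: (PySem.List.pyRange 1 cols 1).map (fun j =>
        if a ≤ j then PySem.List.pyGetD prev j false || PySem.List.pyGetD prev (j - a) false
        else PySem.List.pyGetD prev j false)) row0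
    PySem.List.pyGetD final (cols - 1) false

-- ===== PORT B =====
def findPartion_alt (arr : List Int) (n : Int) : Bool :=
  let total := arr.sum
  if PySem.Int.mod total 2 ≠ 0 then false
  else
    let target := PySem.Int.floordiv total 2
    let reachable := arr.foldl
      (fun (s : PySem.Set Int) num => PySem.Set.union s (s.map (fun r => r + num)))
      (PySem.Set.ofList [0])
    PySem.Set.contains reachable target

-- ===== PRECONDITION & SPEC =====
-- Pre_ excludes arrays holding a negative element whose total is even: there A's rows are sized
-- sum+1 yet dp[i-1][j - arr[i-1]] is read at indices beyond sum (or the rows are empty for a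
-- negative sum), so A raises IndexError or, when the `or` short-circuit happens to skip every
-- out-of-range read, returns an accidental value.
def Pre_findPartion (arr : List Int) (n : Int) : Prop :=
  PySem.Int.mod arr.sum 2 ≠ 0 ∨ ∀ x ∈ arr, 0 ≤ x
instance (arr : List Int) (n : Int) : Decidable (Pre_findPartion arr n) := by
  unfold Pre_findPartion; infer_instance

def pvWitness_findPartion : List Int × Int := ([1, 1], 2)

-- On inputs whose (even, nonnegative) total admits no subset summing to half of it, A returns
-- True — it reads dp[n][sum] (the full sum is always reachable) instead of dp[n][sum // 2] —
-- while B returns False, the intended answer to the equal-sum-partition question.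
def D_findPartion (arr : List Int) (n : Int) : Prop :=
  PySem.Int.mod arr.sum 2 = 0 ∧ ∀ sub ∈ arr.sublists, 2 * sub.sum ≠ arr.sum
instance (arr : List Int) (n : Int) : Decidable (D_findPartion arr n) := by
  unfold D_findPartion; infer_instance

def Spec_findPartion (arr : List Int) (n : Int) (out : Bool) : Prop :=
  ¬ D_findPartion arr n → out = findPartion_alt arr n
instance (arr : List Int) (n : Int) (out : Bool) : Decidable (Spec_findPartion arr n out) := by
  unfold Spec_findPartion; infer_instance

def pvDiffWitness_findPartion : List Int × Int := ([2], 1)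
def pvDiffWitnessOut_findPartion : Bool × Bool := (true, false)

-- ===== CLAIM (what is proved, stated in full; the proofs are below) =====
def Claim_unchanged_findPartion : Prop := ∀ (arr : List Int) (n : Int), Dom_findPartion arr n → Pre_findPartion arr n → Spec_findPartion arr n (findPartion arr n)
def Claim_changed_findPartion : Prop := Dom_findPartion (pvDiffWitness_findPartion.1) (pvDiffWitness_findPartion.2) ∧ Pre_findPartion (pvDiffWitness_findPartion.1) (pvDiffWitness_findPartion.2) ∧ D_findPartion (pvDiffWitness_findPartion.1) (pvDiffWitness_findPartion.2) ∧ findPartion (pvDiffWitness_findPartion.1) (pvDiffWitness_findPartion.2) = pvDiffWitnessOut_findPartion.1 ∧ findPartion_alt (pvDiffWitness_findPartion.1) (pvDiffWitness_findPartion.2) = pvDiffWitnessOut_findPartion.2 ∧ pvDiffWitnessOut_findPartion.1 ≠ pvDiffWitnessOut_findPartion.2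
def Claim_exact_findPartion : Prop := ∀ (arr : List Int) (n : Int), Dom_findPartion arr n → Pre_findPartion arr n → D_findPartion arr n → findPartion arr n ≠ findPartion_alt arr n

-- ===== LEMMAS AND PROOFS =====

-- B's loop: the set reachable after folding l over start s holds exactly y + (sum of a sublist of l)
lemma reach_mem (l : List Int) (s : PySem.Set Int) (x : Int) :
    x ∈ l.foldl (fun (s : PySem.Set Int) num => PySem.Set.union s (s.map (fun r => r + num))) s ↔
      ∃ y ∈ s, ∃ sub : List Int, sub.Sublist l ∧ x = y + sub.sum := by
  induction l generalizing s with
  | nil =>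
    simp only [List.foldl_nil, List.sublist_nil]
    constructor
    · intro hx; exact ⟨x, hx, [], rfl, by simp⟩
    · rintro ⟨y, hy, sub, rfl, rfl⟩; simpa using hy
  | cons a l ih =>
    simp only [List.foldl_cons, ih, PySem.Set.mem_union, List.mem_map]
    constructor
    · rintro ⟨y, hy | ⟨z, hz, rfl⟩, sub, hsub, rfl⟩
      · exact ⟨y, hy, sub, hsub.cons a, rfl⟩
      · exact ⟨z, hz, a :: sub, hsub.cons₂ a, by simp; ring⟩
    · rintro ⟨y, hy, sub, hsub, rfl⟩
      rcases List.sublist_cons_iff.mp hsub with h | ⟨r, rfl, hr⟩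
      · exact ⟨y, Or.inl hy, sub, h, rfl⟩
      · exact ⟨y + a, Or.inr ⟨y, hy, rfl⟩, r, hr, by simp; ring⟩

-- B returns true on an even total exactly when some sublist sums to half of it
lemma alt_true_iff (arr : List Int) (n : Int) (heven : PySem.Int.mod arr.sum 2 = 0) :
    findPartion_alt arr n = true ↔ ∃ sub : List Int, sub.Sublist arr ∧ 2 * sub.sum = arr.sum := by
  obtain ⟨k, hk⟩ : (2 : Int) ∣ arr.sum := (PySem.Int.mod_eq_zero_iff_dvd _ _).mp heven
  have htgt : PySem.Int.floordiv arr.sum 2 = k := by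
    rw [PySem.Int.floordiv_eq_ediv_of_pos (by norm_num : (0:Int) < 2), hk, Int.mul_ediv_cancel_left _ (by norm_num)]
  simp only [findPartion_alt, heven, ne_eq, not_true_eq_false, if_false, htgt]
  rw [PySem.Set.contains_iff, reach_mem]
  constructor
  · rintro ⟨y, hy, sub, hsub, hx⟩
    simp only [PySem.Set.ofList] at hy
    refine ⟨sub, hsub, ?_⟩
    have : y = 0 := by simpa using hy
    omega
  · rintro ⟨sub, hsub, hs⟩
    exact ⟨0, by simp [PySem.Set.ofList], sub, hsub, by omega⟩

-- A's loop invariant: after folding a nonnegative prefix l whose sum is ≤ T, the maintained row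
-- has length T+1 and holds True at index l.sum
lemma rowInv (T : Int) (hT : 0 ≤ T) (l : List Int) (hnn : ∀ x ∈ l, 0 ≤ x) (hle : l.sum ≤ T) :
    (l.foldl (fun prev a =>
        true :: (PySem.List.pyRange 1 (T + 1) 1).map (fun j =>
          if a ≤ j then PySem.List.pyGetD prev j false || PySem.List.pyGetD prev (j - a) false
          else PySem.List.pyGetD prev j false))
      (true :: (PySem.List.pyRange 1 (T + 1) 1).map (fun _ => false))).length = T.toNat + 1 ∧
    PySem.List.pyGetD (l.foldl (fun prev a =>
        true :: (PySem.List.pyRange 1 (T + 1) 1).map (fun j =>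
          if a ≤ j then PySem.List.pyGetD prev j false || PySem.List.pyGetD prev (j - a) false
          else PySem.List.pyGetD prev j false))
      (true :: (PySem.List.pyRange 1 (T + 1) 1).map (fun _ => false))) l.sum false = true := by
  induction l using List.reverseRecOn with
  | nil =>
    constructor
    · simp [PySem.List.length_pyRange_one]
    · simp [PySem.List.pyGetD_zero_cons]
  | append_singleton l a ih =>
    have ha : 0 ≤ a := hnn a (by simp)
    have hnn' : ∀ x ∈ l, 0 ≤ x := fun x hx => hnn x (by simp [hx])
    have hsum0 : 0 ≤ l.sum := List.sum_nonneg hnn'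
    have hsum : l.sum + a ≤ T := by simpa using hle
    have hle' : l.sum ≤ T := by omega
    obtain ⟨hlen, hget⟩ := ih hnn' hle'
    rw [List.foldl_append]
    set prev := l.foldl (fun prev a =>
        true :: (PySem.List.pyRange 1 (T + 1) 1).map (fun j =>
          if a ≤ j then PySem.List.pyGetD prev j false || PySem.List.pyGetD prev (j - a) false
          else PySem.List.pyGetD prev j false))
      (true :: (PySem.List.pyRange 1 (T + 1) 1).map (fun _ => false)) with hprev
    simp only [List.foldl_cons, List.foldl_nil]
    have hlen' : (true :: (PySem.List.pyRange 1 (T + 1) 1).map (fun j =>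
          if a ≤ j then PySem.List.pyGetD prev j false || PySem.List.pyGetD prev (j - a) false
          else PySem.List.pyGetD prev j false)).length = T.toNat + 1 := by
      simp [PySem.List.length_pyRange_one]
    refine ⟨hlen', ?_⟩
    have hs : (l ++ [a]).sum = l.sum + a := by simp
    rw [hs]
    rcases eq_or_lt_of_le (show (0 : Int) ≤ l.sum + a by omega) with h0 | hpos
    · rw [← h0, PySem.List.pyGetD_zero_cons]
    · -- index k = l.sum + a ≥ 1: the cell written by the inner loop at j = k
      have hk0 : 0 ≤ l.sum + a := by omega
      have hklt : l.sum + a < ((true :: (PySem.List.pyRange 1 (T + 1) 1).map (fun j =>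
          if a ≤ j then PySem.List.pyGetD prev j false || PySem.List.pyGetD prev (j - a) false
          else PySem.List.pyGetD prev j false)).length : Int) := by
        rw [hlen']; push_cast; omega
      rw [PySem.List.pyGetD_eq_getElem _ false hk0 hklt]
      obtain ⟨m, hm⟩ : ∃ m, (l.sum + a).toNat = m + 1 := ⟨(l.sum + a).toNat - 1, by omega⟩
      simp only [hm, List.getElem_cons_succ, List.getElem_map, PySem.List.getElem_pyRange_one]
      have hj : (1 : Int) + (m : Int) = l.sum + a := by omega
      rw [hj, if_pos (by omega : a ≤ l.sum + a)]
      have h2 : l.sum + a - a = l.sum := by omega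
      rw [h2, hget, Bool.or_true]

-- A returns true whenever the total is even and every element is nonnegative
lemma a_true (arr : List Int) (n : Int) (heven : PySem.Int.mod arr.sum 2 = 0)
    (hnn : ∀ x ∈ arr, 0 ≤ x) : findPartion arr n = true := by
  have hT : 0 ≤ arr.sum := List.sum_nonneg hnn
  obtain ⟨-, hget⟩ := rowInv arr.sum hT arr hnn le_rfl
  simp only [findPartion, heven, ne_eq, not_true_eq_false, if_false]
  have : arr.sum + 1 - 1 = arr.sum := by omega
  rw [this]
  exact hget

-- ===== VERDICT (by name: the statements are the Claim_ definitions above) =====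
theorem findPartion_spec : Claim_unchanged_findPartion := by
  intro arr n hdom hpre hnd
  by_cases hm : PySem.Int.mod arr.sum 2 = 0
  · have hnn : ∀ x ∈ arr, 0 ≤ x := by
      rcases hpre with h | h
      · exact absurd hm h
      · exact h
    have hsub : ∃ sub : List Int, sub.Sublist arr ∧ 2 * sub.sum = arr.sum := by
      unfold D_findPartion at hnd
      push Not at hnd
      rcases hnd hm with ⟨sub, hmem, hsum⟩
      exact ⟨sub, List.mem_sublists.mp hmem, hsum⟩
    rw [a_true arr n hm hnn]
    exact ((alt_true_iff arr n hm).mpr hsub).symm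
  · have h1 : findPartion arr n = false := by
      unfold findPartion; rw [if_pos hm]
    have h2 : findPartion_alt arr n = false := by
      unfold findPartion_alt; rw [if_pos hm]
    rw [h1, h2]

theorem findPartion_changed : Claim_changed_findPartion := by
  unfold Claim_changed_findPartion; decide

theorem findPartion_tight : Claim_exact_findPartion := by
  intro arr n hdom hpre hd
  obtain ⟨hm, hall⟩ := hd
  have hnn : ∀ x ∈ arr, 0 ≤ x := by
    rcases hpre with h | h
    · exact absurd hm h
    · exact h
  have ha : findPartion arr n = true := a_true arr n hm hnn
  have hb : findPartion_alt arr n = false := by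
    by_contra h
    have : findPartion_alt arr n = true := by
      cases hx : findPartion_alt arr n
      · exact absurd hx h
      · rfl
    rcases (alt_true_iff arr n hm).mp this with ⟨sub, hsub, hsum⟩
    exact hall sub (List.mem_sublists.mpr hsub) hsum
  rw [ha, hb]; simp
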